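-- pv_equiv track=rewrite | github.com/JayRathod341997/ML-DL-NLP | DL/Recurrent_Neural_Networks_LSTM_GRU/codes/04_solution.py | has_run
-- ===== SOURCE A (Python) =====
-- def has_run(seq, k=5):
--     run = 0
--     for v in seq:
--         if v == 1:
--             run += 1
--             if run >= k:
--                 return True
--         else:
--             run = 0
--     return False
-- ===== SOURCE B (Python) =====
-- def has_run(seq, k=5):
--     # Run-segmentation: build the list of maximal runs (value, length), then
--     # check whether any run of ones has length >= k.
--     runs = []
--     for v in seq:
--         if runs and runs[-1][0] == v:
--             w, n = runs[-1]
--             runs[-1] = (w, n + 1)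
--         else:
--             runs.append((v, 1))
--     return any(v == 1 and n >= k for v, n in runs)
-- ===== Notes on version B (the rewrite author's own statement) =====
-- stated objective: alternative
-- what changed: Replaces A's stateful running counter with early return by a run-segmentation pass that builds the list of maximal (value, length) runs and then tests whether any run of ones has length >= k.
import Mathlib
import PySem

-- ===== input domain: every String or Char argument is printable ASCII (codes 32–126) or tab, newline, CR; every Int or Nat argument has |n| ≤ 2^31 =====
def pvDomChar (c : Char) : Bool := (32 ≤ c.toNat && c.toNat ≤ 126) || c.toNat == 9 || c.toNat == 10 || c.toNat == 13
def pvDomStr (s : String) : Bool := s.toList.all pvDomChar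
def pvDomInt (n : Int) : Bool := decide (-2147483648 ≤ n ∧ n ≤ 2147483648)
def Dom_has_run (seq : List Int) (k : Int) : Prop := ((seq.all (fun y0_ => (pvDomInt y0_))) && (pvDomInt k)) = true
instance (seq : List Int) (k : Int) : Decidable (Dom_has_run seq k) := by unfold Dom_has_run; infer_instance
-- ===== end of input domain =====

-- B builds the list of maximal (value, length) runs and tests them, instead of A's
-- stateful running counter with early return (objective: alternative).

-- ===== PORT A =====
-- the for-loop of A with its early `return True`, carrying the running counter `run`
def hrGo (seq : List Int) (run : Int) (k : Int) : Bool :=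
  match seq with
  | [] => false
  | v :: t =>
    if v == 1 then
      (if run + 1 ≥ k then true else hrGo t (run + 1) k)
    else hrGo t 0 k

def has_run (seq : List Int) (k : Int) : Bool := hrGo seq 0 k

-- ===== PORT B =====
-- one step of Source B's run-building loop: extend the last run (`runs[-1]`) or append a new one
def hrStep (acc : List (Int × Int)) (v : Int) : List (Int × Int) :=
  match acc.getLast? with
  | some (w, n) => if w == v then acc.dropLast ++ [(w, n + 1)] else acc ++ [(v, 1)]
  | none => [(v, 1)]

def has_run_alt (seq : List Int) (k : Int) : Bool :=
  (seq.foldl hrStep []).any (fun p => p.1 == 1 && decide (p.2 ≥ k))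

-- ===== PRECONDITION & SPEC =====
def Spec_has_run (seq : List Int) (k : Int) (out : Bool) : Prop := out = has_run_alt seq k
instance (seq : List Int) (k : Int) (out : Bool) : Decidable (Spec_has_run seq k out) := by unfold Spec_has_run; infer_instance

-- ===== CLAIM (what is proved, stated in full; the proofs are below) =====
def Claim_equal_has_run : Prop := ∀ (seq : List Int) (k : Int), Dom_has_run seq k → Spec_has_run seq k (has_run seq k)

-- ===== LEMMAS AND PROOFS =====

-- structural (front-recursive) characterisation of the run list built by B's loop
def runsF : List Int → List (Int × Int)
  | [] => []
  | v :: t =>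
    match runsF t with
    | (w, n) :: rest => if w == v then (v, n + 1) :: rest else (v, 1) :: (w, n) :: rest
    | [] => [(v, 1)]

theorem runsF_cons_eq (v : Int) (t : List Int) :
    runsF (v :: t)
      = match runsF t with
        | (w, n) :: rest => if w == v then (v, n + 1) :: rest else (v, 1) :: (w, n) :: rest
        | [] => [(v, 1)] := by
  conv_lhs => rw [runsF]

theorem hrGo_cons_eq (v : Int) (t : List Int) (run k : Int) :
    hrGo (v :: t) run k
      = if v == 1 then (if run + 1 ≥ k then true else hrGo t (run + 1) k)
        else hrGo t 0 k := by
  conv_lhs => rw [hrGo]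

theorem hrStep_snoc (rs : List (Int × Int)) (w n v : Int) :
    hrStep (rs ++ [(w, n)]) v
      = rs ++ (if w == v then [(w, n + 1)] else [(w, n), (v, 1)]) := by
  simp only [hrStep, List.getLast?_concat, List.dropLast_concat]
  split <;> simp

theorem hrStep_append (rs rest : List (Int × Int)) (v : Int) (h : rest ≠ []) :
    hrStep (rs ++ rest) v = rs ++ hrStep rest v := by
  rcases List.eq_nil_or_concat rest with rfl | ⟨qs, ⟨w, n⟩, rfl⟩
  · exact absurd rfl h
  · simp only [List.concat_eq_append]
    rw [← List.append_assoc, hrStep_snoc, hrStep_snoc, List.append_assoc]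

theorem hrStep_ne_nil (rest : List (Int × Int)) (v : Int) (h : rest ≠ []) :
    hrStep rest v ≠ [] := by
  rcases List.eq_nil_or_concat rest with rfl | ⟨qs, ⟨w, n⟩, rfl⟩
  · exact absurd rfl h
  · simp only [List.concat_eq_append]
    rw [hrStep_snoc]
    split <;> simp

theorem foldl_hrStep_append (seq : List Int) (rs rest : List (Int × Int)) (h : rest ≠ []) :
    seq.foldl hrStep (rs ++ rest) = rs ++ seq.foldl hrStep rest := by
  induction seq generalizing rest with
  | nil => simp
  | cons v t ih =>
    simp only [List.foldl_cons]
    rw [hrStep_append rs rest v h, ih _ (hrStep_ne_nil rest v h)]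

theorem foldl_hrStep_single (t : List Int) (v n : Int) :
    t.foldl hrStep [(v, n)]
      = match runsF t with
        | (w, m) :: rest => if w == v then (v, m + n) :: rest else (v, n) :: (w, m) :: rest
        | [] => [(v, n)] := by
  induction t generalizing v n with
  | nil => simp [runsF]
  | cons u s ih =>
    simp only [List.foldl_cons]
    by_cases hvu : v = u
    · subst hvu
      have hst : hrStep [(v, n)] v = [(v, n + 1)] := by simp [hrStep]
      rw [hst, ih, runsF_cons_eq]
      cases hs : runsF s with
      | nil => simp; ring
      | cons p rest =>
        obtain ⟨w, m⟩ := p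
        by_cases hwv : w = v
        · subst hwv
          simp [add_comm, add_left_comm]
        · have hb : (w == v) = false := by simpa using hwv
          simp [hb, add_comm]
    · have hvub : (v == u) = false := by simpa using hvu
      have hst : hrStep [(v, n)] u = [(v, n), (u, 1)] := by simp [hrStep, hvub]
      rw [hst, show [(v, n), (u, 1)] = [(v, n)] ++ [(u, 1)] from rfl,
        foldl_hrStep_append s [(v, n)] [(u, 1)] (by simp), ih, runsF_cons_eq]
      have huvb : (u == v) = false := by simpa using Ne.symm hvu
      cases hs : runsF s with
      | nil => simp [huvb]
      | cons p rest =>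
        obtain ⟨w, m⟩ := p
        by_cases hwu : w = u
        · subst hwu; simp [huvb]
        · have hb : (w == u) = false := by simpa using hwu
          simp [hb, huvb]

theorem foldl_hrStep_eq (seq : List Int) : seq.foldl hrStep [] = runsF seq := by
  cases seq with
  | nil => simp [runsF]
  | cons v t =>
    simp only [List.foldl_cons]
    rw [show hrStep [] v = [(v, 1)] from by simp [hrStep], foldl_hrStep_single, runsF_cons_eq]

-- length of the leading run of ones, and the sequence after it
def lead1 : List Int → Int
  | [] => 0
  | v :: t => if v = 1 then lead1 t + 1 else 0

def drop1 : List Int → List Int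
  | [] => []
  | v :: t => if v = 1 then drop1 t else v :: t

theorem lead1_nonneg (t : List Int) : 0 ≤ lead1 t := by
  induction t with
  | nil => simp [lead1]
  | cons v t ih => simp only [lead1]; split <;> omega

def anyF (seq : List Int) (k : Int) : Bool :=
  (runsF seq).any (fun p => p.1 == 1 && decide (p.2 ≥ k))

theorem runsF_one (t : List Int) :
    runsF (1 :: t) = (1, 1 + lead1 t) :: runsF (drop1 t) := by
  induction t with
  | nil => simp [runsF, lead1, drop1]
  | cons u s ih =>
    by_cases hu : u = 1
    · subst hu
      rw [runsF_cons_eq, ih]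
      simp [lead1, drop1, add_assoc]
    · have hub : (u == (1 : Int)) = false := by simpa using hu
      rw [runsF_cons_eq]
      have hhead : ∃ m rest, runsF (u :: s) = (u, m) :: rest := by
        rw [runsF_cons_eq]
        cases runsF s with
        | nil => exact ⟨1, [], rfl⟩
        | cons p rest =>
          obtain ⟨w, n⟩ := p
          by_cases h : w == u
          · exact ⟨n + 1, rest, by simp [h]⟩
          · exact ⟨1, (w, n) :: rest, by simp [h]⟩
      obtain ⟨m, rest, hh⟩ := hhead
      rw [hh]
      simp [hub, lead1, drop1, hu, ← hh]

theorem anyF_cons_ne (v : Int) (t : List Int) (k : Int) (hv : v ≠ 1) :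
    anyF (v :: t) k = anyF t k := by
  have hvb : (v == (1 : Int)) = false := by simpa using hv
  unfold anyF
  rw [runsF_cons_eq]
  cases ht : runsF t with
  | nil => simp [hvb]
  | cons p rest =>
    obtain ⟨w, n⟩ := p
    by_cases hwv : w = v
    · subst hwv; simp [hvb]
    · have hb : (w == v) = false := by simpa using hwv
      simp [hb, hvb]

theorem anyF_split (seq : List Int) (k : Int) :
    anyF seq k = ((decide (1 ≤ lead1 seq ∧ lead1 seq ≥ k)) || anyF (drop1 seq) k) := by
  cases seq with
  | nil => simp [anyF, runsF, lead1, drop1]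
  | cons v t =>
    by_cases hv : v = 1
    · subst hv
      have h1 := lead1_nonneg t
      have hL : lead1 (1 :: t) = lead1 t + 1 := by simp [lead1]
      have hD : drop1 (1 :: t) = drop1 t := by simp [drop1]
      rw [hL, hD]
      conv_lhs => rw [anyF, runsF_one]
      simp only [List.any_cons, beq_self_eq_true, Bool.true_and]
      have hd : decide ((1 : Int) + lead1 t ≥ k) = decide (1 ≤ lead1 t + 1 ∧ lead1 t + 1 ≥ k) := by
        simp only [decide_eq_decide]; omega
      rw [hd]
      rfl
    · have hL : lead1 (v :: t) = 0 := by simp [lead1, hv]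
      have hD : drop1 (v :: t) = v :: t := by simp [drop1, hv]
      rw [anyF_cons_ne v t k hv, hL, hD, anyF_cons_ne v t k hv]
      simp

theorem hrGo_char (t : List Int) (run k : Int) :
    hrGo t run k = ((decide (1 ≤ lead1 t ∧ run + lead1 t ≥ k)) || anyF (drop1 t) k) := by
  induction t generalizing run with
  | nil => simp [hrGo, lead1, drop1, anyF, runsF]
  | cons v s ih =>
    rw [hrGo_cons_eq]
    by_cases hv : v = 1
    · subst hv
      have h0 := lead1_nonneg s
      have hL : lead1 (1 :: s) = lead1 s + 1 := by simp [lead1]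
      have hD : drop1 (1 :: s) = drop1 s := by simp [drop1]
      rw [hL, hD]
      simp only [beq_self_eq_true, if_true]
      by_cases hk : run + 1 ≥ k
      · rw [if_pos hk]
        have hc : (1 ≤ lead1 s + 1 ∧ run + (lead1 s + 1) ≥ k) := by omega
        simp [hc]
      · rw [if_neg hk, ih]
        congr 1
        simp only [decide_eq_decide]
        omega
    · have hvb : (v == (1 : Int)) = false := by simpa using hv
      have hL : lead1 (v :: s) = 0 := by simp [lead1, hv]
      have hD : drop1 (v :: s) = v :: s := by simp [drop1, hv]
      simp only [hvb, Bool.false_eq_true, if_false]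
      rw [ih, hL, hD]
      have h0 := lead1_nonneg s
      have hd : decide (1 ≤ lead1 s ∧ 0 + lead1 s ≥ k) = decide (1 ≤ lead1 s ∧ lead1 s ≥ k) := by
        simp only [decide_eq_decide]; omega
      rw [hd, ← anyF_split s k, anyF_cons_ne v s k hv]
      simp

theorem alt_eq_anyF (seq : List Int) (k : Int) : has_run_alt seq k = anyF seq k := by
  unfold has_run_alt anyF
  rw [foldl_hrStep_eq]

-- ===== VERDICT (by name: the statement is the Claim_ definition above) =====
theorem has_run_spec : Claim_equal_has_run := by
  intro seq k _
  unfold Spec_has_run has_run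
  rw [alt_eq_anyF, hrGo_char]
  have hd : decide (1 ≤ lead1 seq ∧ 0 + lead1 seq ≥ k) = decide (1 ≤ lead1 seq ∧ lead1 seq ≥ k) := by
    simp only [decide_eq_decide]; omega
  rw [hd]
  exact (anyF_split seq k).symm
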